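-- pv_equiv track=rewrite | github.com/kuayiraphael/datastructuresandalgorithms | 05-May-2025/Sasha and Array Coloring 348434.py | func
-- ===== SOURCE A (Python) =====
-- def func(n,a):
--     max_sum = 0
--
--     a.sort()
--
--     left = 0
--     right = n-1
--     while left<right:
--         max_sum += a[right]-a[left]
--         left +=1
--         right -=1
--     return max_sum
-- ===== SOURCE B (Python) =====
-- def smallsum(xs, k):
--     # sum of the k smallest elements of xs (0 if k <= 0, sum(xs) if k >= len(xs)),
--     # by iterative three-way quickselect partitioning -- no sorting.
--     acc = 0
--     while True:
--         if k <= 0: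
--             return acc
--         if k >= len(xs):
--             return acc + sum(xs)
--         p = xs[0]
--         lo = [x for x in xs if x < p]
--         eq = [x for x in xs if x == p]
--         hi = [x for x in xs if x > p]
--         if k <= len(lo):
--             xs = lo
--         elif k <= len(lo) + len(eq):
--             return acc + sum(lo) + p * (k - len(lo))
--         else:
--             acc += sum(lo) + sum(eq)
--             xs = hi
--             k -= len(lo) + len(eq)
--
-- def func(n, a):
--     # Same return value as A; does not sort `a` in place (A does).
--     k = n // 2
--     return smallsum(a, n) - smallsum(a, n - k) - smallsum(a, k)
-- ===== Notes on version B (the rewrite author's own statement) =====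
-- stated objective: alternative
-- what changed: Replaces sorting entirely: B computes the answer as smallsum(a,n) - smallsum(a,n//2) - smallsum(a,n-n//2), where smallsum finds the sum of the k smallest elements by iterative three-way quickselect partitioning (average linear selection, no sort).
-- outside the precondition, e.g. on func(3, [5, 1]): A raises IndexError, B returns -1
import Mathlib
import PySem

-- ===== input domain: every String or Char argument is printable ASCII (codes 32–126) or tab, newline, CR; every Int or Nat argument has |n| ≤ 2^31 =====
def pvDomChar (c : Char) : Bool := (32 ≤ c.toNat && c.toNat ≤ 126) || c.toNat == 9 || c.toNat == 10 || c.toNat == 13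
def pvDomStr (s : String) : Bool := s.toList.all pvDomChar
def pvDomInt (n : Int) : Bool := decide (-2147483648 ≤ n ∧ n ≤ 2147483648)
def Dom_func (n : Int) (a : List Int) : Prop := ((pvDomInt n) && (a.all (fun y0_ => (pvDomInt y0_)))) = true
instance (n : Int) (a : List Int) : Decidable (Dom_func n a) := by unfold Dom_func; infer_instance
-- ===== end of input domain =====

-- B computes the answer without sorting, via quickselect-style three-way partitioning
-- (sum of the k smallest elements); equivalence is about the RETURN value only:
-- A sorts `a` in place, B does not mutate it.

-- ===== PORT A =====
-- the while loop: left/right pointers, accumulator; a[right]/a[left] via pyGetD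
-- (in range under Pre_func whenever the loop body runs)
def funcLoop (s : List Int) (left right acc : Int) : Int :=
  if left < right then
    funcLoop s (left + 1) (right - 1)
      (acc + (PySem.List.pyGetD s right 0 - PySem.List.pyGetD s left 0))
  else acc
termination_by (right - left).toNat
decreasing_by omega

def func (n : Int) (a : List Int) : Int :=
  funcLoop (PySem.List.sorted a (fun x => x) false) 0 (n - 1) 0

-- ===== PORT B =====
-- iterative quickselect loop of Source B (the `while True`), ported as recursion on the
-- shrinking partition; the three list comprehensions are the three filters
def smallsum (xs : List Int) (k : Int) (acc : Int) : Int :=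
  if k ≤ 0 then acc
  else if (xs.length : Int) ≤ k then acc + xs.sum
  else
    match xs with
    | [] => acc  -- unreachable: here k > 0 and xs.length > k
    | p :: rest =>
      let los := (p :: rest).filter (fun x => decide (x < p))
      let eqs := (p :: rest).filter (fun x => x == p)
      let his := (p :: rest).filter (fun x => decide (p < x))
      if k ≤ (los.length : Int) then smallsum los k acc
      else if k ≤ (los.length : Int) + eqs.length then
        acc + los.sum + p * (k - los.length)
      else smallsum his (k - los.length - eqs.length) (acc + los.sum + eqs.sum)
termination_by xs.length
decreasing_by
  · simp only [List.filter_cons, decide_eq_true_eq, lt_irrefl, if_false]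
    have := List.length_filter_le (fun x => decide (x < p)) rest
    simp at this ⊢; omega
  · simp only [List.filter_cons, decide_eq_true_eq, lt_irrefl, if_false]
    have := List.length_filter_le (fun x => decide (p < x)) rest
    simp at this ⊢; omega

def func_alt (n : Int) (a : List Int) : Int :=
  let k := PySem.Int.floordiv n 2
  smallsum a n 0 - smallsum a (n - k) 0 - smallsum a k 0

-- ===== PRECONDITION & SPEC =====
-- Pre_ excludes exactly the inputs where A raises IndexError (the loop runs and reads a[n-1] past the end)
def Pre_func (n : Int) (a : List Int) : Prop := n ≤ a.length ∨ n ≤ 1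
instance (n : Int) (a : List Int) : Decidable (Pre_func n a) := by unfold Pre_func; infer_instance
def pvWitness_func : Int × List Int := (4, [3, -1, 2, 7])

def Spec_func (n : Int) (a : List Int) (out : Int) : Prop := out = func_alt n a
instance (n : Int) (a : List Int) (out : Int) : Decidable (Spec_func n a out) := by unfold Spec_func; infer_instance

-- ===== CLAIM (what is proved, stated in full; the proofs are below) =====
def Claim_equal_func : Prop := ∀ (n : Int) (a : List Int), Dom_func n a → Pre_func n a → Spec_func n a (func n a)

-- ===== LEMMAS AND PROOFS =====

-- the loop computed as two slice sums; m = number of iterations = ⌊(r+1-l)/2⌋ (0 when the loop does not run)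
theorem funcLoop_eq (s : List Int) (g : Nat) :
    ∀ (l r acc : Int), 0 ≤ l → r < s.length → (r + 1 - l).toNat ≤ g →
    funcLoop s l r acc =
      acc + ((s.drop (r + 1 - (max (r + 1 - l) 0) / 2).toNat).take ((max (r + 1 - l) 0) / 2).toNat).sum
          - ((s.drop l.toNat).take ((max (r + 1 - l) 0) / 2).toNat).sum := by
  induction g using Nat.strong_induction_on with
  | _ g ih =>
    intro l r acc hl hr hg
    by_cases hlr : l < r
    · have hg2 : 2 ≤ g := by omega
      rw [funcLoop, if_pos hlr]
      have hr' : r - 1 < (s.length : Int) := by omega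
      have hrec := ih (g - 2) (by omega) (l + 1) (r - 1)
        (acc + (PySem.List.pyGetD s r 0 - PySem.List.pyGetD s l 0)) (by omega) hr' (by omega)
      rw [hrec]
      set m' : Int := (max (r - 1 + 1 - (l + 1)) 0) / 2 with hm'
      have hm : (max (r + 1 - l) 0) / 2 = m' + 1 := by omega
      have hm'0 : 0 ≤ m' := by positivity
      have hm'lt : m' ≤ r - l - 1 := by omega
      rw [hm]
      have hidx1 : (r + 1 - (m' + 1)).toNat = (r - m').toNat := by omega
      have hidx2 : (r - 1 + 1 - m').toNat = (r - m').toNat := by omega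
      have hRlen : (r - m').toNat + m'.toNat < s.length := by omega
      have hRight : (s.drop (r - m').toNat).take ((m' + 1)).toNat
          = (s.drop (r - m').toNat).take m'.toNat ++ [s[(r - m').toNat + m'.toNat]] := by
        have hTN : (m' + 1).toNat = m'.toNat + 1 := by omega
        rw [hTN, List.take_add_one]
        congr 1
        have : (s.drop (r - m').toNat)[m'.toNat]? = some s[(r - m').toNat + m'.toNat] := by
          rw [List.getElem?_drop]
          exact List.getElem?_eq_getElem (by omega)
        simp [this]
      have hlLen : l.toNat < s.length := by omega
      have hLeft : (s.drop l.toNat).take ((m' + 1)).toNat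
          = s[l.toNat] :: (s.drop (l + 1).toNat).take m'.toNat := by
        have hTN : (m' + 1).toNat = m'.toNat + 1 := by omega
        have hdrop : s.drop l.toNat = s[l.toNat] :: s.drop (l.toNat + 1) :=
          List.drop_eq_getElem_cons hlLen
        have h1 : (l + 1).toNat = l.toNat + 1 := by omega
        rw [hTN, hdrop, List.take_succ_cons, h1]
      rw [hidx1, hidx2, hRight, hLeft]
      have hgr : PySem.List.pyGetD s r 0 = s[(r - m').toNat + m'.toNat] := by
        rw [PySem.List.pyGetD_eq_getElem s 0 (by omega) hr]
        congr 1
        omega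
      have hgl : PySem.List.pyGetD s l 0 = s[l.toNat] :=
        PySem.List.pyGetD_eq_getElem s 0 hl (by omega)
      rw [hgr, hgl]
      simp [List.sum_append]
      ring
    · rw [funcLoop, if_neg hlr]
      have hm0 : (max (r + 1 - l) 0) / 2 = 0 := by omega
      simp [hm0]

-- the three partition filters are a permutation of the list
theorem pv_perm_partition (p : Int) (xs : List Int) :
    (xs.filter (fun x => decide (x < p)) ++ xs.filter (fun x => x == p)
      ++ xs.filter (fun x => decide (p < x))).Perm xs := by
  induction xs with
  | nil => simp
  | cons x t ih =>
    rcases lt_trichotomy x p with h | h | h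
    · rw [List.filter_cons, List.filter_cons, List.filter_cons,
        if_pos (by simpa using h), if_neg (by simp; omega), if_neg (by simp; omega)]
      exact ih.cons x
    · rw [List.filter_cons, List.filter_cons, List.filter_cons,
        if_neg (by simp; omega), if_pos (by simpa using h), if_neg (by simp; omega)]
      have hmid : List.filter (fun y => decide (y < p)) t
            ++ (x :: List.filter (fun y => y == p) t)
            ++ List.filter (fun y => decide (p < y)) t
          = List.filter (fun y => decide (y < p)) t
            ++ x :: (List.filter (fun y => y == p) t ++ List.filter (fun y => decide (p < y)) t) := by
        simp [List.append_assoc]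
      rw [hmid]
      exact List.perm_middle.trans (by simpa [List.append_assoc] using ih.cons x)
    · rw [List.filter_cons, List.filter_cons, List.filter_cons,
        if_neg (by simp; omega), if_neg (by simp; omega), if_pos (by simpa using h)]
      exact List.perm_middle.trans (ih.cons x)

-- sorted(xs) decomposes as sorted(<p) ++ (=p) ++ sorted(>p)
theorem pv_msort_decomp (p : Int) (xs : List Int) :
    PySem.List.sorted xs (fun x => x) false
      = PySem.List.sorted (xs.filter (fun x => decide (x < p))) (fun x => x) false
        ++ xs.filter (fun x => x == p)
        ++ PySem.List.sorted (xs.filter (fun x => decide (p < x))) (fun x => x) false := by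
  apply PySem.List.sorted_id_eq_of_perm_of_pairwise
  · exact (((PySem.List.sorted_perm _ _ _).append_right _).append
      (PySem.List.sorted_perm _ _ _)).trans (pv_perm_partition p xs)
  · have hlo : ∀ x ∈ PySem.List.sorted (xs.filter (fun x => decide (x < p))) (fun x => x) false,
        x < p := by
      intro x hx
      have := (PySem.List.mem_sorted _ _ _ _).mp hx
      simpa using (List.mem_filter.mp this).2
    have heq : ∀ x ∈ xs.filter (fun x => x == p), x = p := by
      intro x hx
      simpa using (List.mem_filter.mp hx).2
    have hhi : ∀ x ∈ PySem.List.sorted (xs.filter (fun x => decide (p < x))) (fun x => x) false,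
        p < x := by
      intro x hx
      have := (PySem.List.mem_sorted _ _ _ _).mp hx
      simpa using (List.mem_filter.mp this).2
    rw [List.pairwise_append, List.pairwise_append]
    refine ⟨⟨?_, ?_, ?_⟩, ?_, ?_⟩
    · have := PySem.List.sorted_pairwise (xs.filter (fun x => decide (x < p))) (fun x : Int => x)
      exact this.imp (by intro a b h; simpa using h)
    · exact List.Pairwise.imp (by intro a b h; omega)
        (List.pairwise_of_forall_mem_list (l := xs.filter (fun x => x == p))
          (r := fun a b => a = p ∧ b = p) (fun a ha b hb => ⟨heq a ha, heq b hb⟩))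
    · intro a ha b hb
      have := hlo a ha
      have := heq b hb
      omega
    · have := PySem.List.sorted_pairwise (xs.filter (fun x => decide (p < x))) (fun x : Int => x)
      exact this.imp (by intro a b h; simpa using h)
    · intro a ha b hb
      have h2 := hhi b hb
      rcases List.mem_append.mp ha with ha | ha
      · have := hlo a ha; omega
      · have := heq a ha; omega

-- a list of copies of p: sum of a prefix of length m is p * m
theorem pv_sum_const (p : Int) (l : List Int) (h : ∀ x ∈ l, x = p) : l.sum = p * l.length := by
  induction l with
  | nil => simp
  | cons x t ih =>
    have hx : x = p := h x (by simp)
    have ht := ih (fun y hy => h y (List.mem_cons_of_mem x hy))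
    simp [hx, ht]
    ring

-- smallsum computes acc + sum of the first k elements of the sorted list
theorem smallsum_eq (g : Nat) : ∀ (xs : List Int) (k acc : Int), xs.length ≤ g →
    smallsum xs k acc
      = acc + ((PySem.List.sorted xs (fun x => x) false).take k.toNat).sum := by
  induction g using Nat.strong_induction_on with
  | _ g ih =>
    intro xs k acc hg
    rw [smallsum.eq_def]
    by_cases h0 : k ≤ 0
    · rw [if_pos h0]
      have : k.toNat = 0 := by omega
      simp [this]
    rw [if_neg h0]
    by_cases hall : (xs.length : Int) ≤ k
    · rw [if_pos hall]
      have hlen : (PySem.List.sorted xs (fun x : Int => x) false).length ≤ k.toNat := by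
        rw [PySem.List.length_sorted]; omega
      rw [List.take_of_length_le hlen]
      rw [(PySem.List.sorted_perm xs (fun x : Int => x) false).sum_eq]
    rw [if_neg hall]
    match xs with
    | [] => simp at hall; omega
    | p :: rest =>
      simp only []
      set los := (p :: rest).filter (fun x => decide (x < p)) with hlos
      set eqs := (p :: rest).filter (fun x => x == p) with heqs
      set his := (p :: rest).filter (fun x => decide (p < x)) with hhis
      have hdecomp := pv_msort_decomp p (p :: rest)
      rw [← hlos, ← heqs, ← hhis] at hdecomp
      have hparts : los.length + eqs.length + his.length = (p :: rest).length := by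
        have h := (pv_perm_partition p (p :: rest)).length_eq
        rw [← hlos, ← heqs, ← hhis] at h
        simp only [List.length_append] at h
        omega
      have hlosLt : los.length < (p :: rest).length := by
        have hpeq : p ∈ eqs := by simp [heqs]
        have := List.length_pos_of_mem hpeq
        omega
      have hhisLt : his.length < (p :: rest).length := by
        have hpeq : p ∈ eqs := by simp [heqs]
        have := List.length_pos_of_mem hpeq
        omega
      have hLA : (PySem.List.sorted los (fun x : Int => x) false).length = los.length :=
        PySem.List.length_sorted _ _ _
      have hLC : (PySem.List.sorted his (fun x : Int => x) false).length = his.length :=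
        PySem.List.length_sorted _ _ _
      rw [hdecomp, List.take_append, List.take_append,
        List.sum_append, List.sum_append, List.length_append, hLA]
      by_cases hc1 : k ≤ (los.length : Int)
      · rw [if_pos hc1]
        have e1 : k.toNat - los.length = 0 := by omega
        have e2 : k.toNat - (los.length + eqs.length) = 0 := by omega
        rw [e1, e2]
        simp only [List.take_zero, List.sum_nil, add_zero]
        exact ih (g - 1) (by omega) los k acc (by omega)
      rw [if_neg hc1]
      have htakeA : (PySem.List.sorted los (fun x : Int => x) false).take k.toNat
          = PySem.List.sorted los (fun x : Int => x) false := by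
        apply List.take_of_length_le
        rw [hLA]; omega
      have hsumA : (PySem.List.sorted los (fun x : Int => x) false).sum = los.sum :=
        (PySem.List.sorted_perm _ _ _).sum_eq
      have heqp : ∀ x ∈ eqs, x = p := by
        intro x hx
        exact beq_iff_eq.mp (List.mem_filter.mp (show x ∈ (p :: rest).filter (fun y => y == p) from hx)).2
      by_cases hc2 : k ≤ (los.length : Int) + eqs.length
      · rw [if_pos hc2]
        have htakeB : (eqs.take (k.toNat - los.length)).sum
            = p * ((k.toNat - los.length : Nat) : Int) := by
          have hmem : ∀ x ∈ eqs.take (k.toNat - los.length), x = p :=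
            fun x hx => heqp x (List.mem_of_mem_take hx)
          rw [pv_sum_const p _ hmem, List.length_take]
          congr 1
          omega
        have e2 : k.toNat - (los.length + eqs.length) = 0 := by omega
        rw [htakeA, e2, htakeB, hsumA]
        simp only [List.take_zero, List.sum_nil, add_zero]
        have : ((k.toNat - los.length : Nat) : Int) = k - los.length := by omega
        rw [this]
        ring
      · rw [if_neg hc2]
        have htakeB : eqs.take (k.toNat - los.length) = eqs := by
          apply List.take_of_length_le
          omega
        have hrec := ih (g - 1) (by omega) his (k - los.length - eqs.length)
          (acc + los.sum + eqs.sum) (by omega)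
        rw [hrec, htakeA, htakeB, hsumA]
        have : (k - (los.length : Int) - eqs.length).toNat
            = k.toNat - (los.length + eqs.length) := by omega
        rw [this]
        ring

theorem func_eq (n : Int) (a : List Int) (hpre : Pre_func n a) :
    func n a = func_alt n a := by
  unfold func func_alt
  set s := PySem.List.sorted a (fun x : Int => x) false with hs
  have hlen : s.length = a.length := PySem.List.length_sorted a _ _
  set k : Int := PySem.Int.floordiv n 2 with hk
  have hkdiv : k = n / 2 := PySem.Int.floordiv_eq_ediv_of_pos (by omega)
  have hT : ∀ j acc : Int, smallsum a j acc = acc + (s.take j.toNat).sum := by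
    intro j acc
    exact smallsum_eq a.length a j acc le_rfl
  simp only [hT, zero_add]
  by_cases h1 : n ≤ 1
  · rw [funcLoop, if_neg (by omega)]
    by_cases h0 : n ≤ 0
    · have e1 : n.toNat = 0 := by omega
      have e2 : (n - k).toNat = 0 := by omega
      have e3 : k.toNat = 0 := by omega
      simp [e1, e2, e3]
    · have hn1 : n = 1 := by omega
      have ek : k = 0 := by omega
      have e2 : n - k = 1 := by omega
      rw [e2, hn1, ek]
      simp
  · have hn : 2 ≤ n := by omega
    have hna : n ≤ (a.length : Int) := by
      rcases hpre with h | h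
      · exact h
      · omega
    have hmain := funcLoop_eq s n.toNat 0 (n - 1) 0 le_rfl (by omega) (by omega)
    have hmeq : (max (n - 1 + 1 - 0) 0) / 2 = k := by omega
    rw [hmeq] at hmain
    rw [hmain]
    have hsplit : s.take n.toNat = s.take (n - k).toNat ++ (s.drop (n - k).toNat).take k.toNat := by
      have : n.toNat = (n - k).toNat + k.toNat := by omega
      rw [this, List.take_add]
    have hidx : (n - 1 + 1 - k).toNat = (n - k).toNat := by omega
    rw [hidx] at hmain ⊢
    rw [hsplit, List.sum_append]
    simp only [Int.toNat_zero, List.drop_zero, zero_add]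
    ring

-- ===== VERDICT (by name: the statement is the Claim_ definition above) =====
theorem func_spec : Claim_equal_func := by
  intro n a _ hpre
  unfold Spec_func
  exact func_eq n a hpre
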